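-- pv_equiv track=rewrite | github.com/tancan3/EMO3 | services/scale_engine.py | _sum_with_reverse
-- ===== SOURCE A (Python) =====
-- from typing import Dict
--
-- def _sum_with_reverse(items: Dict[int, int], reversed_items, max_item_score: int) -> int:
--     total = 0
--     for idx, raw in items.items():
--         raw_value = int(raw)
--         if idx in reversed_items:
--             total += max_item_score - raw_value
--         else:
--             total += raw_value
--     return total
-- ===== SOURCE B (Python) =====
-- def _sum_with_reverse(items, reversed_items, max_item_score):
--     total = sum(int(raw) for raw in items.values())
--     for idx in set(reversed_items):
--         if idx in items:
--             total += max_item_score - 2 * int(items[idx])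
--     return total
-- ===== Notes on version B (the rewrite author's own statement) =====
-- stated objective: alternative
-- what changed: B replaces the per-item membership test with a plain sum of all raw values followed by a correction pass over the deduplicated reversed indices, adding max_item_score - 2*raw for each reversed key present.
import Mathlib
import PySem

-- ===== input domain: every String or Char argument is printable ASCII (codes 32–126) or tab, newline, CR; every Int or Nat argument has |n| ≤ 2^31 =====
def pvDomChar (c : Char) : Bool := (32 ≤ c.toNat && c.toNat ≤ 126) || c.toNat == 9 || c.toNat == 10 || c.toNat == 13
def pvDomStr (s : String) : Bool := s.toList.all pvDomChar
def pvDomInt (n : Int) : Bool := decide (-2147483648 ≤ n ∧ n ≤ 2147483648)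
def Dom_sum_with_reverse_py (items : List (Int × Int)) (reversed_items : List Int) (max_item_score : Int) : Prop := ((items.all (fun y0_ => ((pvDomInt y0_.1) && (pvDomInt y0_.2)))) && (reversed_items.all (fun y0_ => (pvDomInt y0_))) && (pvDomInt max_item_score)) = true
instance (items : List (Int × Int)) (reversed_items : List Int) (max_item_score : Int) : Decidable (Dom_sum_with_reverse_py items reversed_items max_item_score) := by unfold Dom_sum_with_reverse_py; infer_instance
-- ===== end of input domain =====

-- B computes the plain sum of raw values and then corrects the reversed entries in a second
-- pass over the deduplicated reversed indices (objective: alternative decomposition).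

-- ===== PORT A =====
def sum_with_reverse_py (items : List (Int × Int)) (reversed_items : List Int) (max_item_score : Int) : Int :=
  items.foldl (fun total p =>
    let raw_value := p.2
    if p.1 ∈ reversed_items then total + (max_item_score - raw_value)
    else total + raw_value) 0

-- ===== PORT B =====
def sum_with_reverse_py_alt (items : List (Int × Int)) (reversed_items : List Int) (max_item_score : Int) : Int :=
  let base := (items.map (fun p => p.2)).sum
  (PySem.Set.ofList reversed_items).foldl (fun total idx =>
    match items.lookup idx with
    | some v => total + (max_item_score - 2 * v)
    | none => total) base

-- ===== PRECONDITION & SPEC =====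
-- Pre_ excludes association lists with duplicate keys: 'items' ports a Python dict, whose keys
-- are always distinct, so no Python input reaches such a list.
def Pre_sum_with_reverse_py (items : List (Int × Int)) (reversed_items : List Int) (max_item_score : Int) : Prop :=
  (items.map Prod.fst).Nodup
instance (items : List (Int × Int)) (reversed_items : List Int) (max_item_score : Int) : Decidable (Pre_sum_with_reverse_py items reversed_items max_item_score) := by unfold Pre_sum_with_reverse_py; infer_instance
def pvWitness_sum_with_reverse_py : (List (Int × Int)) × List Int × Int := ([(1, 2), (3, 4)], [1, 1, 5], 10)

def Spec_sum_with_reverse_py (items : List (Int × Int)) (reversed_items : List Int) (max_item_score : Int) (out : Int) : Prop := out = sum_with_reverse_py_alt items reversed_items max_item_score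
instance (items : List (Int × Int)) (reversed_items : List Int) (max_item_score : Int) (out : Int) : Decidable (Spec_sum_with_reverse_py items reversed_items max_item_score out) := by unfold Spec_sum_with_reverse_py; infer_instance

-- ===== CLAIM (what is proved, stated in full; the proofs are below) =====
def Claim_equal_sum_with_reverse_py : Prop := ∀ (items : List (Int × Int)) (reversed_items : List Int) (max_item_score : Int), Dom_sum_with_reverse_py items reversed_items max_item_score → Pre_sum_with_reverse_py items reversed_items max_item_score → Spec_sum_with_reverse_py items reversed_items max_item_score (sum_with_reverse_py items reversed_items max_item_score)

-- ===== LEMMAS AND PROOFS =====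

-- Updating a summand at one point of a duplicate-free list: if f vanishes at k, replacing its
-- value at k by c shifts the sum by c exactly when k is in the list.
theorem sum_map_update_point {S : List Int} (hS : S.Nodup) (k : Int) (c : Int)
    (f : Int → Int) (hfk : f k = 0) :
    (S.map (fun x => if x = k then c else f x)).sum
      = (S.map f).sum + (if k ∈ S then c else 0) := by
  induction S with
  | nil => simp
  | cons x xs ih =>
    rcases List.nodup_cons.mp hS with ⟨hx, hxs⟩
    by_cases hxk : x = k
    · subst hxk
      have hT : (xs.map (fun y => if y = x then c else f y)).sum = (xs.map f).sum := by
        apply congrArg List.sum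
        apply List.map_congr_left
        intro y hy
        have : y ≠ x := fun h => hx (h ▸ hy)
        simp [this]
      simp [hT, hfk]
      ring
    · have := ih hxs
      simp only [List.map_cons, List.sum_cons, this]
      have hkx : ¬ k = x := fun h => hxk h.symm
      simp [hxk, List.mem_cons, hkx]
      ring

-- The correction term of B as a sum, equated with the reversed part of A's per-item choice.
theorem correction_eq {items : List (Int × Int)} (hnd : (items.map Prod.fst).Nodup)
    (rev : List Int) (hrevnd : rev.Nodup) (m : Int) :
    (rev.map (fun idx => match items.lookup idx with
        | some v => m - 2 * v
        | none => 0)).sum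
      = (items.map (fun p => if p.1 ∈ rev then m - 2 * p.2 else 0)).sum := by
  induction items with
  | nil => simp
  | cons p ps ih =>
    rcases List.nodup_cons.mp hnd with ⟨hp, hps⟩
    have hlook : ∀ idx, List.lookup idx (p :: ps)
        = if idx = p.1 then some p.2 else List.lookup idx ps := by
      intro idx
      by_cases h : idx = p.1
      · simp [List.lookup, h]
      · have hb : (idx == p.1) = false := beq_eq_false_iff_ne.mpr h
        simp [List.lookup, hb, h]
    have hfk : (fun idx => match List.lookup idx ps with
        | some v => m - 2 * v
        | none => (0 : Int)) p.1 = 0 := by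
      have : List.lookup p.1 ps = none := by
        rw [List.lookup_eq_none_iff]
        intro a ha
        have hmem : a.1 ∈ List.map Prod.fst ps := List.mem_map_of_mem ha
        simp only [bne_iff_ne, ne_eq]
        intro heq
        exact hp (heq ▸ hmem)
      simp [this]
    have hstep : (rev.map (fun idx => match List.lookup idx (p :: ps) with
        | some v => m - 2 * v
        | none => 0)).sum
        = (rev.map (fun idx => if idx = p.1 then m - 2 * p.2 else
            (match List.lookup idx ps with
              | some v => m - 2 * v
              | none => 0))).sum := by
      apply congrArg List.sum
      apply List.map_congr_left
      intro idx _
      rw [hlook idx]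
      by_cases h : idx = p.1 <;> simp [h]
    rw [hstep, sum_map_update_point hrevnd p.1 (m - 2 * p.2) _ hfk, ih hps]
    simp [add_comm]

-- A's fold written as a sum of per-item contributions.
theorem portA_eq_sum (items : List (Int × Int)) (rev : List Int) (m : Int) :
    sum_with_reverse_py items rev m
      = (items.map (fun p => if p.1 ∈ rev then m - p.2 else p.2)).sum := by
  unfold sum_with_reverse_py
  show items.foldl (fun total p =>
      if p.1 ∈ rev then total + (m - p.2) else total + p.2) 0
    = (items.map (fun p => if p.1 ∈ rev then m - p.2 else p.2)).sum
  have h1 : items.foldl (fun total p =>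
      if p.1 ∈ rev then total + (m - p.2) else total + p.2) 0
      = items.foldl (fun total p =>
          total + (if p.1 ∈ rev then m - p.2 else p.2)) 0 := by
    apply PySem.List.foldl_congr_mem
    intro acc p _
    by_cases h : p.1 ∈ rev <;> simp [h]
  rw [h1, PySem.List.foldl_add]
  simp

-- B's fold written as the base sum plus the correction sum.
theorem portB_eq_sum (items : List (Int × Int)) (rev : List Int) (m : Int) :
    sum_with_reverse_py_alt items rev m
      = (items.map (fun p => p.2)).sum
        + ((PySem.Set.ofList rev).map (fun idx => match items.lookup idx with
            | some v => m - 2 * v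
            | none => 0)).sum := by
  unfold sum_with_reverse_py_alt
  show (PySem.Set.ofList rev).foldl (fun total idx =>
      match items.lookup idx with
      | some v => total + (m - 2 * v)
      | none => total) ((items.map (fun p => p.2)).sum)
    = (items.map (fun p => p.2)).sum
      + ((PySem.Set.ofList rev).map (fun idx => match items.lookup idx with
          | some v => m - 2 * v
          | none => 0)).sum
  have h1 : (PySem.Set.ofList rev).foldl (fun total idx =>
      match items.lookup idx with
      | some v => total + (m - 2 * v)
      | none => total) ((items.map (fun p => p.2)).sum)
      = (PySem.Set.ofList rev).foldl (fun total idx =>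
          total + (match items.lookup idx with
            | some v => m - 2 * v
            | none => 0)) ((items.map (fun p => p.2)).sum) := by
    apply PySem.List.foldl_congr_mem
    intro acc idx _
    cases items.lookup idx <;> simp
  rw [h1, PySem.List.foldl_add]

-- ===== VERDICT (by name: the statement is the Claim_ definition above) =====
theorem sum_with_reverse_py_spec : Claim_equal_sum_with_reverse_py := by
  intro items rev m _ hpre
  unfold Spec_sum_with_reverse_py
  rw [portA_eq_sum, portB_eq_sum]
  have hset : ∀ idx : Int, idx ∈ PySem.Set.ofList rev ↔ idx ∈ rev := by
    intro idx; simp [PySem.Set.mem_ofList]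
  have hnd : (PySem.Set.ofList rev).Nodup := PySem.Set.nodup_ofList rev
  rw [correction_eq hpre (PySem.Set.ofList rev) hnd m]
  have : ∀ p : Int × Int,
      (if p.1 ∈ rev then m - p.2 else p.2)
        = p.2 + (if p.1 ∈ PySem.Set.ofList rev then m - 2 * p.2 else 0) := by
    intro p
    by_cases h : p.1 ∈ rev
    · simp [h, (hset p.1).mpr h]; ring
    · have : p.1 ∉ PySem.Set.ofList rev := fun hc => h ((hset p.1).mp hc)
      simp [h, this]
  calc (items.map (fun p => if p.1 ∈ rev then m - p.2 else p.2)).sum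
      = (items.map (fun p => p.2 + (if p.1 ∈ PySem.Set.ofList rev then m - 2 * p.2 else 0))).sum := by
        apply congrArg List.sum; apply List.map_congr_left; intro p _; exact this p
    _ = (items.map (fun p => p.2)).sum
        + (items.map (fun p => if p.1 ∈ PySem.Set.ofList rev then m - 2 * p.2 else 0)).sum := by
        rw [← List.sum_map_add]
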